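-- pv_equiv track=rewrite | github.com/sgrodnik/extention-for-pyRevit | ХТ.tab/Misc.panel/Tools.stack/Мусор.pulldown/ViewsAndFilters.pushbutton/ViewsAndFilters_script_del.py | map_names_to_keys
-- ===== SOURCE A (Python) =====
-- def map_names_to_keys(dict_):
--     names = [dict_[i][1] for i in dict_]
--     twins = [i for i in names if names.count(i) > 1]
--     result = {}
--     for key in dict_:
--         item, name = dict_[key]
--         new_name = (name + ' [' + str(key) + ']') if name in twins else name
--         dict_[key] = (item, new_name)
--         result[new_name] = item
--     return result
-- ===== SOURCE B (Python) =====
-- def map_names_to_keys(dict_):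
--     names_sorted = sorted(v[1] for v in dict_.values())
--     dups = {a for a, b in zip(names_sorted, names_sorted[1:]) if a == b}
--     result = {}
--     for key, (item, name) in list(dict_.items()):
--         new_name = (name + ' [' + str(key) + ']') if name in dups else name
--         dict_[key] = (item, new_name)
--         result[new_name] = item
--     return result
-- ===== Notes on version B (the rewrite author's own statement) =====
-- stated objective: faster
-- what changed: B detects duplicate names by sorting them once and collecting adjacent equal pairs into a set, instead of A's quadratic names.count comprehension plus per-element linear scan of the twins list.
import Mathlib
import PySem

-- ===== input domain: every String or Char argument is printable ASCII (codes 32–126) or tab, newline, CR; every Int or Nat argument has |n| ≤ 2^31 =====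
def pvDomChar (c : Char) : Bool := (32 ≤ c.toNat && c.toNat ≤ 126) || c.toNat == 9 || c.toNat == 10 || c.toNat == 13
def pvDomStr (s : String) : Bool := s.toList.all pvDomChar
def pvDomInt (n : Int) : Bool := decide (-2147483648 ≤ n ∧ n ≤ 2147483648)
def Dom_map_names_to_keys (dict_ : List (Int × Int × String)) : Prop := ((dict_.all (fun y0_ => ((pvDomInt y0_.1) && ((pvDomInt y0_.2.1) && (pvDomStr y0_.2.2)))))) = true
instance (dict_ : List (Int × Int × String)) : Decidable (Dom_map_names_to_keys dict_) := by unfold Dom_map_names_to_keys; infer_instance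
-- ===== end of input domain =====

-- B finds the duplicate names by sorting them once and collecting adjacent equal pairs,
-- instead of A's quadratic names.count comprehension; both Pythons mutate dict_ in place
-- identically — the theorems are about the return value.

-- ===== PORT A =====
def map_names_to_keys (dict_ : List (Int × Int × String)) : List (String × Int) :=
  let d0 : PySem.Dict Int (Int × String) := PySem.Dict.mk dict_
  let names := d0.keys.map (fun i => (d0.getD i (0, "")).2)
  let twins := names.filter (fun i => names.count i > 1)
  let res := d0.keys.foldl (fun (st : PySem.Dict Int (Int × String) × PySem.Dict String Int) key =>
      let iv := st.1.getD key (0, "")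
      let new_name := if twins.contains iv.2 then iv.2 ++ " [" ++ PySem.Int.toStr key ++ "]" else iv.2
      (st.1.insert key (iv.1, new_name), st.2.insert new_name iv.1)) (d0, PySem.Dict.empty)
  res.2.items

-- ===== PORT B =====
def map_names_to_keys_alt (dict_ : List (Int × Int × String)) : List (String × Int) :=
  let d0 : PySem.Dict Int (Int × String) := PySem.Dict.mk dict_
  let namesSorted := PySem.List.sorted (d0.values.map (fun v => v.2)) (fun s => s) false
  let dups : PySem.Set String :=
    PySem.Set.ofList
      (((namesSorted.zip (PySem.List.slice namesSorted (some 1) none)).filter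
          (fun p => p.1 == p.2)).map (·.1))
  let result : PySem.Dict String Int :=
    d0.items.foldl (fun (r : PySem.Dict String Int) p =>
      let new_name := if dups.contains p.2.2 then p.2.2 ++ " [" ++ PySem.Int.toStr p.1 ++ "]" else p.2.2
      r.insert new_name p.2.1) PySem.Dict.empty
  result.items

-- ===== PRECONDITION & SPEC =====
-- An association list with a duplicated key represents no Python dict (dict keys are unique),
-- so such lists lie outside every actual input of A; they are the only inputs excluded.
def Pre_map_names_to_keys (dict_ : List (Int × Int × String)) : Prop :=
  (dict_.map (·.1)).Nodup
instance (dict_ : List (Int × Int × String)) : Decidable (Pre_map_names_to_keys dict_) := by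
  unfold Pre_map_names_to_keys; infer_instance

def pvWitness_map_names_to_keys : (List (Int × Int × String)) :=
  [(1, 10, "a"), (2, 20, "a"), (3, 30, "b")]

def Spec_map_names_to_keys (dict_ : List (Int × Int × String)) (out : List (String × Int)) : Prop := out = map_names_to_keys_alt dict_
instance (dict_ : List (Int × Int × String)) (out : List (String × Int)) : Decidable (Spec_map_names_to_keys dict_ out) := by unfold Spec_map_names_to_keys; infer_instance

-- ===== CLAIM (what is proved, stated in full; the proofs are below) =====
def Claim_equal_map_names_to_keys : Prop := ∀ (dict_ : List (Int × Int × String)), Dom_map_names_to_keys dict_ → Pre_map_names_to_keys dict_ → Spec_map_names_to_keys dict_ (map_names_to_keys dict_)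

-- ===== LEMMAS AND PROOFS =====

-- A's renaming loop, threading the mutated dict: as long as the keys are distinct and the
-- threaded dict still returns each remaining entry's original value, only the result dict matters.
lemma loopA_eq (nm : Int → String → String) :
    ∀ (l : List (Int × Int × String)) (d : PySem.Dict Int (Int × String)) (r : PySem.Dict String Int),
      (l.map (·.1)).Nodup →
      (∀ p ∈ l, d.getD p.1 (0, "") = p.2) →
      ((l.map (·.1)).foldl (fun (st : PySem.Dict Int (Int × String) × PySem.Dict String Int) key =>
          (st.1.insert key ((st.1.getD key (0, "")).1, nm key (st.1.getD key (0, "")).2),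
           st.2.insert (nm key (st.1.getD key (0, "")).2) (st.1.getD key (0, "")).1)) (d, r)).2
        = l.foldl (fun r p => r.insert (nm p.1 p.2.2) p.2.1) r := by
  intro l
  induction l with
  | nil => intro d r _ _; rfl
  | cons p l ih =>
      intro d r hnd hinv
      simp only [List.map_cons, List.nodup_cons, List.mem_map] at hnd
      have hp : d.getD p.1 (0, "") = p.2 := hinv p (List.mem_cons_self ..)
      simp only [List.map_cons, List.foldl_cons, hp]
      apply ih
      · exact hnd.2
      · intro q hq
        have hne : q.1 ≠ p.1 := by
          intro h
          exact hnd.1 ⟨q, hq, h⟩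
        rw [PySem.Dict.getD_insert_of_ne _ _ _ hne]
        exact hinv q (List.mem_cons_of_mem _ hq)

-- B's duplicate detection: heading an adjacent equal pair in the sorted name list
-- is the same as occurring more than once.
def adjL (s : List String) : List String :=
  ((s.zip s.tail).filter (fun p => p.1 == p.2)).map (·.1)

lemma adj_count (s : List String) (x : String) (h : x ∈ adjL s) : 1 < s.count x := by
  induction s with
  | nil => simp [adjL] at h
  | cons a t ih =>
    cases t with
    | nil => simp [adjL] at h
    | cons b u =>
      simp only [adjL, List.tail_cons, List.zip_cons_cons, List.filter_cons] at h
      by_cases hab : (a == b) = true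
      · rw [if_pos hab] at h
        simp only [List.map_cons, List.mem_cons] at h
        rcases h with h | h
        · have hb : b = x := (beq_iff_eq.mp hab).symm.trans h.symm
          rw [List.count_cons, List.count_cons]
          simp [h, hb]
        · have := ih (by simpa [adjL] using h)
          rw [List.count_cons]
          omega
      · rw [if_neg hab] at h
        have := ih (by simpa [adjL] using h)
        rw [List.count_cons]
        omega

lemma count_adj (s : List String) (hs : s.Pairwise (· ≤ ·)) (x : String) (h : 1 < s.count x) :
    x ∈ adjL s := by
  induction s with
  | nil => simp at h
  | cons a t ih =>
    have ha : ∀ y ∈ t, a ≤ y := (List.pairwise_cons.mp hs).1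
    have hts : t.Pairwise (· ≤ ·) := (List.pairwise_cons.mp hs).2
    cases t with
    | nil =>
      have hle : List.count x [a] ≤ 1 := by
        simpa using List.count_le_length (a := x) (l := [a])
      omega
    | cons b u =>
      by_cases hxa : x = a
      · -- a occurs again in b :: u, and by sortedness b = a
        have hcnt : 0 < (b :: u).count x := by
          rw [List.count_cons] at h
          simp [hxa] at h ⊢
          omega
        have hxmem : x ∈ b :: u := List.count_pos_iff.mp hcnt
        have hba : b = a := by
          by_contra hba
          have hlt : a < b := lt_of_le_of_ne (ha b (List.mem_cons_self ..)) (fun hh => hba hh.symm)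
          rcases List.mem_cons.mp hxmem with h1 | h1
          · exact hba (h1 ▸ hxa ▸ rfl)
          · have : b ≤ x := (List.pairwise_cons.mp hts).1 x h1
            rw [hxa] at this
            exact absurd (lt_of_lt_of_le hlt this) (lt_irrefl a)
        simp only [adjL, List.tail_cons, List.zip_cons_cons, List.filter_cons]
        rw [if_pos (by simp [hba])]
        simp [hxa, hba]
      · have h' : 1 < (b :: u).count x := by
          rw [List.count_cons] at h
          simp [Ne.symm hxa] at h
          omega
        have := ih hts h'
        simp only [adjL, List.tail_cons, List.zip_cons_cons, List.filter_cons] at this ⊢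
        by_cases hab : (a == b) = true
        · rw [if_pos hab]
          simp only [List.map_cons, List.mem_cons]
          exact Or.inr (by simpa using this)
        · rw [if_neg hab]
          simpa using this

-- ===== VERDICT (by name: the statement is the Claim_ definition above) =====
theorem map_names_to_keys_spec : Claim_equal_map_names_to_keys := by
  intro dict_ _ hpre
  unfold Spec_map_names_to_keys map_names_to_keys map_names_to_keys_alt
  dsimp only
  have hkeys : (PySem.Dict.mk dict_).keys = dict_.map (·.1) := by
    simp [PySem.Dict.keys]
  have hndk : (PySem.Dict.mk dict_).keys.Nodup := by rw [hkeys]; exact hpre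
  -- names list of A equals the plain second projections
  have hnames : (PySem.Dict.mk dict_).keys.map (fun i => ((PySem.Dict.mk dict_).getD i (0, "")).2)
      = dict_.map (·.2.2) := by
    have hv := PySem.Dict.values_eq_map_keys (PySem.Dict.mk dict_) hndk (0, "")
    calc (PySem.Dict.mk dict_).keys.map (fun i => ((PySem.Dict.mk dict_).getD i (0, "")).2)
        = ((PySem.Dict.mk dict_).keys.map (fun k => (PySem.Dict.mk dict_).getD k (0, ""))).map (·.2) := by
          rw [List.map_map]; simp [Function.comp_def]
      _ = (PySem.Dict.mk dict_).values.map (·.2) := by rw [← hv]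
      _ = dict_.map (·.2.2) := by
          simp [PySem.Dict.values, List.map_map, Function.comp_def]
  rw [hnames]
  -- B's names are the same list, then sorted
  have hvals : (PySem.Dict.mk dict_).values.map (fun v => v.2) = dict_.map (·.2.2) := by
    simp [PySem.Dict.values, List.map_map, Function.comp_def]
  rw [hvals]
  have hinv : ∀ p ∈ dict_, (PySem.Dict.mk dict_).getD p.1 (0, "") = p.2 := by
    intro p hp
    exact PySem.Dict.getD_of_mem_items (PySem.Dict.mk dict_) (by simpa using hp) hndk (0, "")
  rw [hkeys, loopA_eq
    (fun key name =>
      if (List.filter (fun i => decide (List.count i (dict_.map (·.2.2)) > 1)) (dict_.map (·.2.2))).contains name = true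
      then name ++ " [" ++ PySem.Int.toStr key ++ "]" else name)
    dict_ _ _ hpre hinv]
  -- the sorted list, its pairwise order, and B's adjacent-duplicate set
  have hperm := PySem.List.sorted_perm (dict_.map (·.2.2)) (fun s => s) false
  have hpw : (PySem.List.sorted (dict_.map (·.2.2)) (fun s => s) false).Pairwise (· ≤ ·) :=
    PySem.List.sorted_pairwise (dict_.map (·.2.2)) (fun s => s)
  congr 1
  -- the two per-entry bodies agree on every entry of dict_
  apply PySem.List.foldl_congr_mem
  intro r p hp
  have hmem : p.2.2 ∈ dict_.map (·.2.2) := List.mem_map.mpr ⟨p, hp, rfl⟩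
  have hc : ((dict_.map (·.2.2)).filter (fun i => decide (List.count i (dict_.map (·.2.2)) > 1))).contains p.2.2
      = decide ((dict_.map (·.2.2)).count p.2.2 > 1) := by
    simp only [List.contains_eq_mem, List.mem_filter, hmem, true_and, decide_eq_decide]
    simp
  have hiff : p.2.2 ∈ adjL (PySem.List.sorted (dict_.map (·.2.2)) (fun s => s) false)
      ↔ 1 < (dict_.map (·.2.2)).count p.2.2 := by
    constructor
    · intro h
      have := adj_count _ _ h
      rwa [hperm.count_eq] at this
    · intro h
      exact count_adj _ hpw _ (by rwa [hperm.count_eq])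
  have hd : (PySem.Set.ofList
        ((((PySem.List.sorted (dict_.map (·.2.2)) (fun s => s) false).zip
            (PySem.List.slice (PySem.List.sorted (dict_.map (·.2.2)) (fun s => s) false) (some 1) none)).filter
              (fun q => q.1 == q.2)).map (·.1))).contains p.2.2
      = decide ((dict_.map (·.2.2)).count p.2.2 > 1) := by
    rw [PySem.List.slice_from_one]
    by_cases hq : 1 < (dict_.map (·.2.2)).count p.2.2
    · simp only [gt_iff_lt, hq, decide_true]
      rw [PySem.Set.contains_iff, PySem.Set.mem_ofList]
      exact hiff.mpr hq
    · simp only [gt_iff_lt, hq, decide_false]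
      rw [Bool.eq_false_iff]
      intro hcontra
      exact hq (hiff.mp ((PySem.Set.mem_ofList _ _).mp ((PySem.Set.contains_iff _ _).mp hcontra)))
  simp only [hc, hd]
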